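-- pv_equiv track=rewrite | github.com/deep0892/Algorithms_Practice | Leetcode/Microsoft_OA_2019/Min_Moves_to_Obtain_String_Without_3_Identical_Consecutive_Letters.py | count
-- ===== SOURCE A (Python) =====
-- def count(arr):
--     m = len(arr)
--     i = 0
--     cnt = 0
--
--     while(i < m-2):
--         if(arr[i] == arr[i+1] and arr[i] == arr[i+2]):
--             cnt += 1
--             i += 3
--         else:
--             i += 1
--     return cnt
-- ===== SOURCE B (Python) =====
-- def count(arr):
--     # Build maximal run lengths, then sum floor(run/3): one deletion per full triple in each run.
--     runs = []
--     n = 0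
--     prev = None
--     for c in arr:
--         if n and c == prev:
--             n += 1
--         else:
--             if n:
--                 runs.append(n)
--             prev = c
--             n = 1
--     if n:
--         runs.append(n)
--     return sum(r // 3 for r in runs)
-- ===== Notes on version B (the rewrite author's own statement) =====
-- stated objective: simpler
-- what changed: Replaced the skip-3-or-step-1 index loop with a run-length decomposition: build maximal runs of identical characters and return the sum of len(run)//3.
import Mathlib
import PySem

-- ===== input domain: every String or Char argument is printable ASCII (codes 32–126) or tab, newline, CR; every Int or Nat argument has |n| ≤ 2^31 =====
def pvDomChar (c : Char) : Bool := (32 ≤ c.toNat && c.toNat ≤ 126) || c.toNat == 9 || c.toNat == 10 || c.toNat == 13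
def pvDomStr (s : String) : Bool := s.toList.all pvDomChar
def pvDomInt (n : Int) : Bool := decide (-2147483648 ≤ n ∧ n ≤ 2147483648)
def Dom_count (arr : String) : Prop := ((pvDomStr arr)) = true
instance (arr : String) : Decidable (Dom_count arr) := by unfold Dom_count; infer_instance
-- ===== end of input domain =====

-- B replaces A's skip-3-or-step-1 index loop by run-length grouping and summing run//3 (objective: simpler).

-- ===== PORT A =====
-- A's while loop over indices i, accumulator cnt; indices i, i+1, i+2 are always < length
-- when read (i < m-2), so List.getD is exact for Python's arr[i] here.
def countLoop (l : List Char) (i cnt : Nat) : Nat :=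
  if i < l.length - 2 then
    if l.getD i ' ' = l.getD (i+1) ' ' ∧ l.getD i ' ' = l.getD (i+2) ' ' then
      countLoop l (i+3) (cnt+1)
    else
      countLoop l (i+1) cnt
  else cnt
termination_by l.length - i

def count (arr : String) : Int := (countLoop arr.toList 0 0 : Int)

-- ===== PORT B =====
-- collect maximal run lengths: current run char c with length n (n ≥ 1)
def runsAux (t : List Char) (c : Char) (n : Nat) : List Nat :=
  match t with
  | [] => [n]
  | d :: t' => if d = c then runsAux t' c (n+1) else n :: runsAux t' d 1

def count_alt (arr : String) : Int :=
  match arr.toList with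
  | [] => 0
  | c :: t => Int.ofNat (((runsAux t c 1).map (fun r => r / 3)).sum)

-- ===== PRECONDITION & SPEC =====
def Spec_count (arr : String) (out : Int) : Prop := out = count_alt arr
instance (arr : String) (out : Int) : Decidable (Spec_count arr out) := by unfold Spec_count; infer_instance

-- ===== CLAIM (what is proved, stated in full; the proofs are below) =====
def Claim_equal_count : Prop := ∀ (arr : String), Dom_count arr → Spec_count arr (count arr)

-- ===== LEMMAS AND PROOFS =====

-- Greedy on lists: reference characterisation of A's loop.
def G : List Char → Nat
  | a :: b :: c :: t => if a = b ∧ a = c then 1 + G t else G (b :: c :: t)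
  | _ => 0

theorem countLoop_eq_G (l : List Char) (i cnt : Nat) :
    countLoop l i cnt = cnt + G (l.drop i) := by
  induction hk : l.length - i using Nat.strong_induction_on generalizing i cnt with
  | _ k ih =>
  subst hk
  rw [countLoop]
  by_cases h : i < l.length - 2
  · have h0 : i < l.length := by omega
    have h1 : i + 1 < l.length := by omega
    have h2 : i + 2 < l.length := by omega
    have hd : l.drop i = l[i] :: l[i+1] :: l[i+2] :: l.drop (i+3) := by
      rw [List.getElem_cons_drop, List.getElem_cons_drop, List.getElem_cons_drop]
    have g0 : l.getD i ' ' = l[i] := List.getD_eq_getElem l ' ' h0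
    have g1 : l.getD (i+1) ' ' = l[i+1] := List.getD_eq_getElem l ' ' h1
    have g2 : l.getD (i+2) ' ' = l[i+2] := List.getD_eq_getElem l ' ' h2
    rw [if_pos h, hd, G, g0, g1, g2]
    by_cases hc : l[i] = l[i+1] ∧ l[i] = l[i+2]
    · rw [if_pos hc, if_pos hc, ih (l.length - (i+3)) (by omega) (i+3) (cnt+1) rfl]
      omega
    · rw [if_neg hc, if_neg hc, ih (l.length - (i+1)) (by omega) (i+1) cnt rfl]
      have : l.drop (i+1) = l[i+1] :: l[i+2] :: l.drop (i+3) := by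
        rw [List.getElem_cons_drop, List.getElem_cons_drop]
      rw [this]
  · rw [if_neg h]
    have : G (l.drop i) = 0 := by
      have hlen : (l.drop i).length ≤ 2 := by
        simp only [List.length_drop]; omega
      match hm : l.drop i with
      | [] => rfl
      | [_] => rfl
      | [_, _] => rfl
      | _ :: _ :: _ :: _ => rw [hm] at hlen; simp at hlen
    omega

-- one maximal run of length n contributes n / 3
theorem G_run (n : Nat) (c : Char) (rest : List Char) (h : ∀ d ∈ rest.head?, d ≠ c) :
    G (List.replicate n c ++ rest) = n / 3 + G rest := by
  induction n using Nat.strong_induction_on generalizing rest with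
  | _ n ih =>
  match n with
  | 0 => simp
  | 1 =>
    simp only [List.replicate, List.cons_append, List.nil_append]
    match rest, h with
    | [], _ => rfl
    | [b], _ => rfl
    | b :: b' :: t, h =>
      have hb : b ≠ c := h b rfl
      rw [G, if_neg (by tauto)]
      simp
  | 2 =>
    simp only [List.replicate, List.cons_append, List.nil_append]
    match rest, h with
    | [], _ => rfl
    | b :: t, h =>
      have hb : b ≠ c := h b rfl
      rw [G, if_neg (by intro ⟨_, h2⟩; exact hb h2.symm)]
      have h1 := ih 1 (by omega) (b :: t) h
      simpa using h1
  | (m+3) =>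
    have hrep : List.replicate (m+3) c = c :: c :: c :: List.replicate m c := by
      simp [List.replicate_succ]
    rw [hrep]
    simp only [List.cons_append]
    rw [G, if_pos ⟨rfl, rfl⟩, ih m (by omega) rest h]
    omega

theorem runsAux_sum (t : List Char) (c : Char) (k : Nat) :
    ((runsAux t c k).map (fun r => r / 3)).sum = G (List.replicate k c ++ t) := by
  induction t generalizing c k with
  | nil =>
    have h0 := G_run k c [] (by simp)
    have hG : G ([] : List Char) = 0 := rfl
    simp only [List.append_nil, hG] at h0
    simp [runsAux, h0]
  | cons d t' ih =>
    rw [runsAux]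
    by_cases hd : d = c
    · rw [if_pos hd, ih c (k+1)]
      subst hd
      rw [List.replicate_succ']
      simp
    · rw [if_neg hd]
      simp only [List.map_cons, List.sum_cons]
      rw [ih d 1, G_run k c (d :: t') (by simpa using hd)]
      simp [List.replicate]

theorem count_eq (arr : String) : count arr = count_alt arr := by
  unfold count count_alt
  rw [countLoop_eq_G, List.drop_zero, Nat.zero_add]
  match h : arr.toList with
  | [] => simp [show G ([] : List Char) = 0 from rfl]
  | c :: t =>
    show (↑(G (c :: t)) : Int) = Int.ofNat (((runsAux t c 1).map (fun r => r / 3)).sum)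
    rw [runsAux_sum t c 1]
    simp [List.replicate]

-- ===== VERDICT (by name: the statement is the Claim_ definition above) =====
theorem count_spec : Claim_equal_count := by
  intro arr _
  unfold Spec_count
  exact count_eq arr
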